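-- pv_equiv track=rewrite | github.com/adywizard/Modbus-App | modbus_app.py | build_regs_from_bitpattern
-- ===== SOURCE A (Python) =====
-- def build_regs_from_bitpattern(int_val: int, total_bits: int, byte_order: str, word_order: str) -> list[int]:
--     """
--     Construct 16-bit registers from a raw integer bit pattern (for float32/64 hex entry).
--     - total_bits: 32 or 64
--     - byte_order: 'big' or 'little' (within each 16-bit word)
--     - word_order: 'big' or 'little' (order of 16-bit words)
--     """
--     mask = (1 << total_bits) - 1
--     val = int_val & mask
--     nbytes = total_bits // 8
--     be = val.to_bytes(nbytes, byteorder="big", signed=False)  # bytes in big-endian bit significance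
--     # split to 16-bit words
--     words = [list(be[i:i+2]) for i in range(0, len(be), 2)]
--     # byte order within word
--     if byte_order.lower().startswith("l"):
--         for w in words:
--             if len(w) == 2:
--                 w[0], w[1] = w[1], w[0]
--     # word order across words
--     if word_order.lower().startswith("l"):
--         words = list(reversed(words))
--     regs = []
--     for w in words:
--         b0, b1 = (w + [0, 0])[:2]
--         regs.append((b0 << 8) | b1)
--     return regs
-- ===== SOURCE B (Python) =====
-- def _word(val, nbytes, i, swap):
--     shift = 8 * (nbytes - 2 * i - 2)
--     if shift < 0:
--         # trailing lone byte: high byte of the register, zero-padded low byte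
--         return (val & 0xFF) << 8
--     w = (val >> shift) & 0xFFFF
--     if swap:
--         return ((w & 0xFF) << 8) | (w >> 8)
--     return w
--
--
-- def build_regs_from_bitpattern(int_val: int, total_bits: int, byte_order: str, word_order: str) -> list[int]:
--     val = int_val & ((1 << total_bits) - 1)
--     nbytes = total_bits // 8
--     nwords = (nbytes + 1) // 2
--     swap = byte_order.lower().startswith("l")
--     words = [_word(val, nbytes, i, swap) for i in range(nwords)]
--     if word_order.lower().startswith("l"):
--         words.reverse()
--     return words
-- ===== Notes on version B (the rewrite author's own statement) =====
-- stated objective: alternative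
-- what changed: B discards A's to_bytes byte-buffer/list-slicing pipeline and extracts each 16-bit register directly from the masked integer with shifts and masks (byte swap done arithmetically per word, word order by reversing the result list).
import Mathlib
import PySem

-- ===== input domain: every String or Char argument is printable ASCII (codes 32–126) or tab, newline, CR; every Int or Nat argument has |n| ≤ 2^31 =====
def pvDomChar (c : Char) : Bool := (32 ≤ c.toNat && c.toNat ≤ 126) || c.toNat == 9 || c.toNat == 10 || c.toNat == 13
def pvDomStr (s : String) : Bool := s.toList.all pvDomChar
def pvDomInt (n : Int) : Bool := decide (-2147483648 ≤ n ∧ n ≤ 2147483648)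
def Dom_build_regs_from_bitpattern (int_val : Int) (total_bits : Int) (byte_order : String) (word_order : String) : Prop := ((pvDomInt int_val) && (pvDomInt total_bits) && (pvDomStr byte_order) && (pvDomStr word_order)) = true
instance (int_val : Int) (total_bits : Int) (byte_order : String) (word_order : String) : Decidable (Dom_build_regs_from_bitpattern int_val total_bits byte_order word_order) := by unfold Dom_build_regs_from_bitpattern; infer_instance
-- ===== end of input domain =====

-- B drops A's to_bytes byte buffer and 2-byte slicing and extracts each 16-bit word directly
-- from the masked integer by shifts and masks (alternative intermediate representation).

-- ===== PORT A =====
-- val.to_bytes(nbytes, byteorder="big", signed=False): the big-endian byte list; exact where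
-- Python returns a value (0 ≤ val < 256^nbytes, guaranteed by Pre_; Python raises OverflowError otherwise)
def pyToBytesBE (val : Int) (nbytes : Nat) : List Int :=
  (List.range nbytes).map (fun j => PySem.Int.band (val >>> (8 * (nbytes - 1 - j))) 255)

-- the in-place byte swap w[0], w[1] = w[1], w[0], performed when len(w) == 2
def brSwapWord (w : List Int) : List Int :=
  match w with
  | [a, b] => [b, a]
  | _ => w

-- b0, b1 = (w + [0, 0])[:2]; (b0 << 8) | b1
def brCombine (w : List Int) : Int :=
  let p := (w ++ ([0, 0] : List Int)).take 2
  PySem.Int.bor ((p.getD 0 0) <<< (8 : Nat)) (p.getD 1 0)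

def build_regs_from_bitpattern (int_val : Int) (total_bits : Int) (byte_order : String) (word_order : String) : List Int :=
  -- (1 << total_bits) raises ValueError for total_bits < 0 (excluded by Pre_); toNat is harmless there
  let mask : Int := (1 <<< total_bits.toNat) - 1
  let val : Int := PySem.Int.band int_val mask
  let nbytes : Int := PySem.Int.floordiv total_bits 8
  let be : List Int := pyToBytesBE val nbytes.toNat
  let words : List (List Int) :=
    (PySem.List.pyRange 0 (be.length : Int) 2).map (fun i => PySem.List.slice be (some i) (some (i + 2)))
  let words := if PySem.Str.startswith (PySem.Str.lower byte_order) "l"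
               then words.map brSwapWord else words
  let words := if PySem.Str.startswith (PySem.Str.lower word_order) "l"
               then words.reverse else words
  words.foldl (fun regs w => regs ++ [brCombine w]) []

-- ===== PORT B =====
-- helper _word(val, nbytes, i, swap) of Source B
def brWord (val : Int) (nbytes : Int) (i : Int) (swap : Bool) : Int :=
  let shift : Int := 8 * (nbytes - 2 * i - 2)
  if shift < 0 then
    (PySem.Int.band val 255) <<< (8 : Nat)
  else
    let w : Int := PySem.Int.band (val >>> shift.toNat) 65535
    if swap then PySem.Int.bor ((PySem.Int.band w 255) <<< (8 : Nat)) (w >>> (8 : Nat)) else w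

def build_regs_from_bitpattern_alt (int_val : Int) (total_bits : Int) (byte_order : String) (word_order : String) : List Int :=
  let val : Int := PySem.Int.band int_val ((1 <<< total_bits.toNat) - 1)
  let nbytes : Int := PySem.Int.floordiv total_bits 8
  let nwords : Int := PySem.Int.floordiv (nbytes + 1) 2
  let swap : Bool := PySem.Str.startswith (PySem.Str.lower byte_order) "l"
  let words : List Int := (PySem.List.pyRange 0 nwords 1).map (fun i => brWord val nbytes i swap)
  if PySem.Str.startswith (PySem.Str.lower word_order) "l" then words.reverse else words

-- ===== PRECONDITION & SPEC =====
-- Pre_ is exactly the set of inputs on which Python A returns: total_bits ≥ 0 (otherwise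
-- 1 << total_bits raises ValueError) and the masked value fits in total_bits // 8 bytes
-- (otherwise to_bytes raises OverflowError). The fit condition says the bits of int_val at
-- positions [8*(total_bits//8), total_bits) are all zero; it is automatic when total_bits % 8 == 0.
def Pre_build_regs_from_bitpattern (int_val : Int) (total_bits : Int) (byte_order : String) (word_order : String) : Prop :=
  0 ≤ total_bits ∧ (int_val >>> (8 * (total_bits.toNat / 8))).emod (2 ^ (total_bits.toNat % 8)) = 0
instance (int_val : Int) (total_bits : Int) (byte_order : String) (word_order : String) : Decidable (Pre_build_regs_from_bitpattern int_val total_bits byte_order word_order) := by unfold Pre_build_regs_from_bitpattern; infer_instance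

def pvWitness_build_regs_from_bitpattern : Int × Int × String × String := (305419896, 32, "big", "little")

def Spec_build_regs_from_bitpattern (int_val : Int) (total_bits : Int) (byte_order : String) (word_order : String) (out : List Int) : Prop := out = build_regs_from_bitpattern_alt int_val total_bits byte_order word_order
instance (int_val : Int) (total_bits : Int) (byte_order : String) (word_order : String) (out : List Int) : Decidable (Spec_build_regs_from_bitpattern int_val total_bits byte_order word_order out) := by unfold Spec_build_regs_from_bitpattern; infer_instance

-- ===== CLAIM (what is proved, stated in full; the proofs are below) =====
def Claim_equal_build_regs_from_bitpattern : Prop := ∀ (int_val : Int) (total_bits : Int) (byte_order : String) (word_order : String), Dom_build_regs_from_bitpattern int_val total_bits byte_order word_order → Pre_build_regs_from_bitpattern int_val total_bits byte_order word_order → Spec_build_regs_from_bitpattern int_val total_bits byte_order word_order (build_regs_from_bitpattern int_val total_bits byte_order word_order)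

-- ===== LEMMAS AND PROOFS =====

theorem br_nat_merge (m s : Nat) :
    ((m >>> (s + 8)) &&& 255) <<< 8 ||| ((m >>> s) &&& 255) = (m >>> s) &&& 65535 := by
  apply Nat.eq_of_testBit_eq
  intro i
  simp only [Nat.testBit_or, Nat.testBit_and, Nat.testBit_shiftLeft, Nat.testBit_shiftRight,
    show (255:Nat) = 2^8-1 by norm_num, show (65535:Nat) = 2^16-1 by norm_num,
    Nat.testBit_two_pow_sub_one]
  by_cases h8 : i < 8
  · simp [show ¬ (8 ≤ i) by omega, h8, show i < 16 by omega]
  · by_cases h16 : i < 16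
    · simp [show 8 ≤ i by omega, show s + 8 + (i - 8) = s + i by omega, h8, h16,
        show i - 8 < 8 by omega]
    · simp [show ¬ (i - 8 < 8) by omega, h8, h16]

theorem br_nat_hi (m s : Nat) :
    ((m >>> s) &&& 65535) >>> 8 = (m >>> (s + 8)) &&& 255 := by
  apply Nat.eq_of_testBit_eq
  intro i
  simp only [Nat.testBit_and, Nat.testBit_shiftRight,
    show (255:Nat) = 2^8-1 by norm_num, show (65535:Nat) = 2^16-1 by norm_num,
    Nat.testBit_two_pow_sub_one, show s + (8 + i) = s + 8 + i by omega]
  by_cases h : i < 8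
  · simp [h, show 8 + i < 16 by omega]
  · simp [h, show ¬ (8 + i < 16) by omega]

theorem br_nat_lo (m s : Nat) :
    ((m >>> s) &&& 65535) &&& 255 = (m >>> s) &&& 255 := by
  apply Nat.eq_of_testBit_eq
  intro i
  simp only [Nat.testBit_and,
    show (255:Nat) = 2^8-1 by norm_num, show (65535:Nat) = 2^16-1 by norm_num,
    Nat.testBit_two_pow_sub_one]
  by_cases h : i < 8
  · simp [h, show i < 16 by omega]
  · simp [h]

theorem br_chunk_pair {α : Type} (l : List α) (j : Nat) (h : j + 1 < l.length) :
    (l.drop j).take 2 = [l[j], l[j + 1]] := by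
  rw [List.drop_eq_getElem_cons (show j < l.length by omega),
      List.drop_eq_getElem_cons (show j + 1 < l.length from h)]
  rfl

theorem br_chunk_single {α : Type} (l : List α) (j : Nat) (h : j + 1 = l.length) :
    (l.drop j).take 2 = [l[j]'(by omega)] := by
  rw [List.drop_eq_getElem_cons (show j < l.length by omega)]
  rw [List.drop_eq_nil_of_le (by omega)]
  rfl

theorem br_slice_chunk (m n k : Nat) :
    PySem.List.slice (pyToBytesBE (m : Int) n) (some ((2 * k : Nat) : Int)) (some (((2 * k : Nat) : Int) + 2)) =
    ((pyToBytesBE (m : Int) n).drop (2 * k)).take 2 := by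
  rw [PySem.List.slice_toNat _ (by positivity) (by positivity)]
  congr 1
  omega

theorem br_byte (m n j : Nat) (h : j < n) :
    (pyToBytesBE (m : Int) n)[j]'(by simpa [pyToBytesBE] using h) =
    ((m >>> (8 * (n - 1 - j)) &&& 255 : Nat) : Int) := by
  simp only [pyToBytesBE, List.getElem_map, List.getElem_range,
    ← Int.natCast_shiftRight]
  rw [show (255 : Int) = ((255 : Nat) : Int) from rfl, PySem.Int.band_natCast]

theorem br_word_eq (m n k : Nat) (swap : Bool) (hk : k < (n + 1) / 2) :
    brCombine ((if swap then brSwapWord else id)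
        (PySem.List.slice (pyToBytesBE (m : Int) n) (some ((2 * k : Nat) : Int)) (some (((2 * k : Nat) : Int) + 2)))) =
    brWord (m : Int) (n : Int) (k : Int) swap := by
  have hlen : (pyToBytesBE (m : Int) n).length = n := by simp [pyToBytesBE]
  rw [br_slice_chunk]
  by_cases hfull : 2 * k + 2 ≤ n
  · -- full two-byte chunk
    set s : Nat := 8 * (n - 2 * k - 2) with hs
    have hsh : (8 : Int) * ((n : Int) - 2 * (k : Int) - 2) = (s : Int) := by
      omega
    have hpair : ((pyToBytesBE (m : Int) n).drop (2 * k)).take 2 =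
        [((m >>> (s + 8) &&& 255 : Nat) : Int), ((m >>> s &&& 255 : Nat) : Int)] := by
      rw [br_chunk_pair _ _ (by omega : 2 * k + 1 < (pyToBytesBE (m : Int) n).length),
        br_byte m n (2 * k) (by omega), br_byte m n (2 * k + 1) (by omega),
        show 8 * (n - 1 - 2 * k) = s + 8 by omega,
        show 8 * (n - 1 - (2 * k + 1)) = s by omega]
    rw [hpair]
    have hnotneg : ¬ ((8 : Int) * ((n : Int) - 2 * (k : Int) - 2) < 0) := by
      rw [hsh]; exact not_lt.mpr (by positivity)
    cases swap
    · simp only [Bool.false_eq_true, if_false, id_eq]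
      simp only [brWord, hsh, Int.toNat_natCast]
      rw [if_neg (by rw [hsh] at hnotneg; exact hnotneg)]
      simp only [Bool.false_eq_true, if_false]
      simp only [brCombine, List.cons_append, List.take, List.getD, List.getElem?_cons_zero,
        List.getElem?_cons_succ, Option.getD_some]
      rw [← Int.natCast_shiftRight m s, show (65535 : Int) = ((65535 : Nat) : Int) from rfl,
        PySem.Int.band_natCast, ← Int.natCast_shiftLeft, PySem.Int.bor_natCast, br_nat_merge]
    · simp only [if_true, brSwapWord]
      simp only [brWord, hsh, Int.toNat_natCast]
      rw [if_neg (by rw [hsh] at hnotneg; exact hnotneg)]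
      simp only [if_true]
      simp only [brCombine, List.cons_append, List.take, List.getD, List.getElem?_cons_zero,
        List.getElem?_cons_succ, Option.getD_some]
      rw [← Int.natCast_shiftRight m s, show (65535 : Int) = ((65535 : Nat) : Int) from rfl,
        PySem.Int.band_natCast, show (255 : Int) = ((255 : Nat) : Int) from rfl,
        PySem.Int.band_natCast, ← Int.natCast_shiftRight, ← Int.natCast_shiftLeft,
        ← Int.natCast_shiftLeft, PySem.Int.bor_natCast, br_nat_lo, br_nat_hi,
        PySem.Int.bor_natCast]
  · -- lone trailing byte: n = 2k+1
    have hn : n = 2 * k + 1 := by omega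
    have hsingle : ((pyToBytesBE (m : Int) n).drop (2 * k)).take 2 =
        [((m &&& 255 : Nat) : Int)] := by
      rw [br_chunk_single _ _ (by omega : 2 * k + 1 = (pyToBytesBE (m : Int) n).length),
        br_byte m n (2 * k) (by omega), show 8 * (n - 1 - 2 * k) = 0 by omega]
      simp
    rw [hsingle]
    have hneg : (8 : Int) * ((n : Int) - 2 * (k : Int) - 2) < 0 := by
      rw [hn]; push_cast; linarith
    have hcomb : forall x : Int, brCombine [x] = x <<< (8 : Nat) := by
      intro x
      simp only [brCombine, List.cons_append, List.nil_append, List.take, List.getD,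
        List.getElem?_cons_zero, List.getElem?_cons_succ, Option.getD_some]
      simp
    cases swap
    · simp only [Bool.false_eq_true, if_false, id_eq]
      rw [hcomb]
      simp only [brWord]
      rw [if_pos hneg]
      rw [show (255 : Int) = ((255 : Nat) : Int) from rfl, PySem.Int.band_natCast]
    · simp only [if_true, brSwapWord]
      rw [hcomb]
      simp only [brWord]
      rw [if_pos hneg]
      rw [show (255 : Int) = ((255 : Nat) : Int) from rfl, PySem.Int.band_natCast]
theorem br_foldl_append_map {a b : Type} (l : List a) (f : a -> b) :
    l.foldl (fun r w => r ++ [f w]) [] = l.map f := by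
  suffices h : forall acc : List b, l.foldl (fun r w => r ++ [f w]) acc = acc ++ l.map f by
    simpa using h []
  induction l with
  | nil => intro acc; simp
  | cons x xs ih => intro acc; simp [ih, List.append_assoc]

-- A's chunk/swap/reverse/combine pipeline equals B's direct word map, for val = ↑m
theorem br_core (m n : Nat) (swap rev : Bool) :
    (let be := pyToBytesBE (m : Int) n
     let words := (PySem.List.pyRange 0 (be.length : Int) 2).map
       (fun i => PySem.List.slice be (some i) (some (i + 2)))
     let words := if swap then words.map brSwapWord else words
     let words := if rev then words.reverse else words
     words.foldl (fun regs w => regs ++ [brCombine w]) []) =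
    (let words := (PySem.List.pyRange 0 (((n : Int) + 1) / 2) 1).map
       (fun i => brWord (m : Int) (n : Int) i swap)
     if rev then words.reverse else words) := by
  simp only []
  have hlen : (pyToBytesBE (m : Int) n).length = n := by simp [pyToBytesBE]
  have hA : PySem.List.pyRange 0 ((pyToBytesBE (m : Int) n).length : Int) 2 =
      (List.range ((n + 1) / 2)).map (fun k => ((2 * k : Nat) : Int)) := by
    rw [hlen, PySem.List.pyRange_of_pos 0 (n : Int) (by norm_num)]
    have hcnt : (if (0 : Int) < (n : Int) then (((n : Int) - 0 + 2 - 1) / 2).toNat else 0)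
        = (n + 1) / 2 := by
      by_cases hn : 0 < n
      · rw [if_pos (by exact_mod_cast hn)]
        omega
      · rw [if_neg (by omega)]
        omega
    rw [hcnt]
    apply List.map_congr_left
    intro k _
    push_cast
    ring
  have hB : PySem.List.pyRange 0 (((n : Int) + 1) / 2) 1 =
      (List.range ((n + 1) / 2)).map (fun (k : Nat) => (k : Int)) := by
    rw [PySem.List.pyRange_one]
    rw [show (((n : Int) + 1) / 2 - 0).toNat = (n + 1) / 2 by omega]
    apply List.map_congr_left
    intro k _
    simp
  have hcore : (if swap
        then ((PySem.List.pyRange 0 ((pyToBytesBE (m : Int) n).length : Int) 2).map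
          (fun i => PySem.List.slice (pyToBytesBE (m : Int) n) (some i) (some (i + 2)))).map brSwapWord
        else (PySem.List.pyRange 0 ((pyToBytesBE (m : Int) n).length : Int) 2).map
          (fun i => PySem.List.slice (pyToBytesBE (m : Int) n) (some i) (some (i + 2)))).map brCombine =
      (PySem.List.pyRange 0 (((n : Int) + 1) / 2) 1).map
        (fun i => brWord (m : Int) (n : Int) i swap) := by
    rw [hA, hB]
    cases swap
    · simp only [Bool.false_eq_true, if_false, List.map_map, List.map_map]
      apply List.map_congr_left
      intro k hk
      have hk' : k < (n + 1) / 2 := List.mem_range.mp hk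
      simpa using br_word_eq m n k false hk'
    · simp only [if_true, List.map_map, List.map_map]
      apply List.map_congr_left
      intro k hk
      have hk' : k < (n + 1) / 2 := List.mem_range.mp hk
      simpa using br_word_eq m n k true hk'
  rw [br_foldl_append_map]
  cases rev
  · simp only [Bool.false_eq_true, if_false]
    exact hcore
  · simp only [if_true, List.map_reverse]
    rw [hcore]


theorem build_regs_from_bitpattern_spec : Claim_equal_build_regs_from_bitpattern := by
  intro int_val total_bits byte_order word_order _hdom hpre
  obtain ⟨htb, _hfit⟩ := hpre
  unfold Spec_build_regs_from_bitpattern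
  simp only [build_regs_from_bitpattern, build_regs_from_bitpattern_alt]
  set t : Nat := total_bits.toNat with ht
  have hmaskpos : (0 : Int) ≤ ((1 <<< t : Nat) : Int) - 1 := by
    have h1 : (1 : Nat) ≤ 1 <<< t := by
      rw [Nat.shiftLeft_eq]
      simpa using Nat.one_le_two_pow
    omega
  have hvalpos : (0 : Int) ≤ PySem.Int.band int_val (((1 <<< t : Nat) : Int) - 1) := by
    rw [PySem.Int.band_comm]
    exact PySem.Int.band_nonneg_of_nonneg_left int_val hmaskpos
  have hval : PySem.Int.band int_val (((1 <<< t : Nat) : Int) - 1) =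
      (((PySem.Int.band int_val (((1 <<< t : Nat) : Int) - 1)).toNat : Nat) : Int) :=
    (Int.toNat_of_nonneg hvalpos).symm
  have hnb : PySem.Int.floordiv total_bits 8 = ((t / 8 : Nat) : Int) := by
    rw [show total_bits = (t : Int) from (Int.toNat_of_nonneg htb).symm]
    exact_mod_cast PySem.Int.floordiv_natCast t 8
  have hnw : PySem.Int.floordiv (((t / 8 : Nat) : Int) + 1) 2 = (((t / 8 : Nat) : Int) + 1) / 2 :=
    PySem.Int.floordiv_eq_ediv_of_pos (by norm_num)
  rw [hval, hnb, hnw, Int.toNat_natCast]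
  exact br_core ((PySem.Int.band int_val (((1 <<< t : Nat) : Int) - 1)).toNat) (t / 8) _ _
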